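-- pv_equiv track=rewrite | github.com/lineCode/KlayGE | KlayGE/Core/Src/Base/TableGen/TableGen.py | PrepareOptTable
-- ===== SOURCE A (Python) =====
-- def Mul8Bit(a, b):
-- 	t = a * b + 128;
-- 	return (t + (t >> 8)) >> 8;
--
-- def PrepareOptTable(expand):
-- 	size = len(expand)
-- 	o_match = [ [ 0 for i in range(2) ] for j in range(256) ]
-- 	for i in range(256):
-- 		best_err = 256
-- 		for min in range(size):
-- 			for max in range(size):
-- 				min_e = expand[min]
-- 				max_e = expand[max]
-- 				err = abs(max_e + Mul8Bit(min_e - max_e, 0x55) - i);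
-- 				if err < best_err:
-- 					o_match[i][0] = max
-- 					o_match[i][1] = min
-- 					best_err = err
-- 	return o_match
-- ===== SOURCE B (Python) =====
-- def Mul8Bit(a, b):
-- 	t = a * b + 128;
-- 	return (t + (t >> 8)) >> 8;
--
-- def PrepareOptTable(expand):
-- 	size = len(expand)
-- 	# index every blended value by its first (scan-order) pair
-- 	first = {}
-- 	k = 0
-- 	for mn in range(size):
-- 		mn_e = expand[mn]
-- 		for mx in range(size):
-- 			mx_e = expand[mx]
-- 			v = mx_e + Mul8Bit(mn_e - mx_e, 0x55)
-- 			if v not in first: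
-- 				first[v] = (k, mx, mn)
-- 			k += 1
-- 	# for each target, ring-search outward for the nearest indexed value
-- 	table = []
-- 	for i in range(256):
-- 		row = [0, 0]
-- 		for d in range(256):
-- 			lo = first.get(i - d)
-- 			hi = first.get(i + d)
-- 			if lo is not None and hi is not None:
-- 				c = lo if lo[0] < hi[0] else hi
-- 			elif lo is not None:
-- 				c = lo
-- 			else:
-- 				c = hi
-- 			if c is not None:
-- 				row = [c[1], c[2]]
-- 				break
-- 		table.append(row)
-- 	return table
-- ===== Notes on version B (the rewrite author's own statement) =====
-- stated objective: faster
-- what changed: B builds a hash index mapping each blended value to its first scan-order pair once, then answers each of the 256 targets by an outward ring search (distance 0,1,2,... probing value i-d and i+d, earlier scan index breaking the tie), instead of rescanning all size^2 pairs for every target.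
import Mathlib
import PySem

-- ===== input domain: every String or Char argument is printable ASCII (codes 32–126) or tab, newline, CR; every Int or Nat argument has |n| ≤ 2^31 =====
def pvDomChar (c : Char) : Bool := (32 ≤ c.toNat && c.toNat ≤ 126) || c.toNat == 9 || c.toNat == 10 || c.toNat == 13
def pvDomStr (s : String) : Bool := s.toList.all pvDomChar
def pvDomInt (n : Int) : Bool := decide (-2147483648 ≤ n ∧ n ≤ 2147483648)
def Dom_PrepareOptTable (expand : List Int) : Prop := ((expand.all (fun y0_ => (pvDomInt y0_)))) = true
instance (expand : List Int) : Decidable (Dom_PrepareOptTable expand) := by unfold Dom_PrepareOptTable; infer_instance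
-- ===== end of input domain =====

-- B replaces A's per-target scan of all palette pairs by a hash index of the blended values
-- (first scan-order pair per value) queried by an outward ring search per target.

-- ===== PORT A =====
-- shared module helper Mul8Bit (Python '>>' on Int is Lean's '>>>', floor shift)
def Mul8Bit (a b : Int) : Int :=
  let t := a * b + 128
  (t + (t >>> (8 : Nat))) >>> (8 : Nat)

def PrepareOptTable (expand : List Int) : List (List Int) :=
  let size : Int := expand.length
  let o_match : List (List Int) :=
    (PySem.List.pyRange 0 256 1).map (fun _ => (PySem.List.pyRange 0 2 1).map (fun _ => (0 : Int)))
  (PySem.List.pyRange 0 256 1).foldl (fun o_match i =>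
    ((PySem.List.pyRange 0 size 1).foldl (fun s mn =>
      (PySem.List.pyRange 0 size 1).foldl (fun (s : List (List Int) × Int) mx =>
        let mn_e := PySem.List.pyGetD expand mn 0
        let mx_e := PySem.List.pyGetD expand mx 0
        let err := |mx_e + Mul8Bit (mn_e - mx_e) 0x55 - i|
        if err < s.2 then
          (PySem.List.pySetD s.1 i
             (PySem.List.pySetD (PySem.List.pySetD (PySem.List.pyGetD s.1 i []) 0 mx) 1 mn), err)
        else s) s) (o_match, 256)).1) o_match

-- ===== PORT B =====
def PrepareOptTable_alt (expand : List Int) : List (List Int) :=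
  let size : Int := expand.length
  -- index every blended value by its first (scan-order) pair: dict value -> (k, mx, mn)
  let fk : PySem.Dict Int (Int × Int × Int) × Int :=
    (PySem.List.pyRange 0 size 1).foldl (fun fk mn =>
      let mn_e := PySem.List.pyGetD expand mn 0
      (PySem.List.pyRange 0 size 1).foldl (fun (fk : PySem.Dict Int (Int × Int × Int) × Int) mx =>
        let mx_e := PySem.List.pyGetD expand mx 0
        let v := mx_e + Mul8Bit (mn_e - mx_e) 0x55
        ((if fk.1.contains v then fk.1 else fk.1.insert v (fk.2, mx, mn)), fk.2 + 1))
        fk) (PySem.Dict.empty, 0)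
  let first := fk.1
  -- for each target, ring-search outward for the nearest indexed value ('break' = done flag)
  (PySem.List.pyRange 0 256 1).foldl (fun table i =>
    let row : List Int :=
      ((PySem.List.pyRange 0 256 1).foldl (fun (st : List Int × Bool) d =>
        if st.2 then st
        else
          let lo := first.get? (i - d)
          let hi := first.get? (i + d)
          let c : Option (Int × Int × Int) :=
            match lo, hi with
            | some l, some h => some (if l.1 < h.1 then l else h)
            | some l, none => some l
            | none, some h => some h
            | none, none => none
          match c with
          | some c => ([c.2.1, c.2.2], true)
          | none => st) ([0, 0], false)).1
    table ++ [row]) []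

-- ===== PRECONDITION & SPEC =====
def Spec_PrepareOptTable (expand : List Int) (out : List (List Int)) : Prop := out = PrepareOptTable_alt expand
instance (expand : List Int) (out : List (List Int)) : Decidable (Spec_PrepareOptTable expand out) := by unfold Spec_PrepareOptTable; infer_instance

-- ===== CLAIM (what is proved, stated in full; the proofs are below) =====
def Claim_equal_PrepareOptTable : Prop := ∀ (expand : List Int), Dom_PrepareOptTable expand → Spec_PrepareOptTable expand (PrepareOptTable expand)

-- ===== LEMMAS AND PROOFS =====

-- proof-side helpers: the flat pair list, the per-target row, A's outer step, the initial table
def pvMinStep {A : Type} (key : A -> Int) (acc : Option A) (x : A) : Option A :=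
  match acc with
  | none => some x
  | some m => if key x < key m then some x else some m

def pvPairsP (expand : List Int) : List (Int × Int × Int) :=
  (PySem.List.pyRange 0 (expand.length : Int) 1).flatMap (fun mn =>
    (PySem.List.pyRange 0 (expand.length : Int) 1).map (fun mx =>
      (PySem.List.pyGetD expand mx 0 + Mul8Bit (PySem.List.pyGetD expand mn 0 - PySem.List.pyGetD expand mx 0) 0x55, mx, mn)))

def pvRowF (P : List (Int × Int × Int)) (i : Int) : List Int :=
  (PySem.List.min? P (fun p => |p.1 - i|)).elim [0, 0]
    (fun m => if |m.1 - i| < 256 then [m.2.1, m.2.2] else [0, 0])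

def pvStepA (expand : List Int) : List (List Int) -> Int -> List (List Int) := fun o_match i =>
  ((PySem.List.pyRange 0 (expand.length : Int) 1).foldl (fun s mn =>
    (PySem.List.pyRange 0 (expand.length : Int) 1).foldl (fun (s : List (List Int) × Int) mx =>
      let mn_e := PySem.List.pyGetD expand mn 0
      let mx_e := PySem.List.pyGetD expand mx 0
      let err := |mx_e + Mul8Bit (mn_e - mx_e) 0x55 - i|
      if err < s.2 then
        (PySem.List.pySetD s.1 i
          (PySem.List.pySetD (PySem.List.pySetD (PySem.List.pyGetD s.1 i []) 0 mx) 1 mn), err)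
      else s) s) (o_match, 256)).1

def pvT0 : List (List Int) :=
  (PySem.List.pyRange 0 256 1).map (fun _ => (PySem.List.pyRange 0 2 1).map (fun _ => (0 : Int)))

lemma pvMin_eq {A : Type} (key : A -> Int) (l : List A) :
    PySem.List.min? l key = l.foldl (pvMinStep key) none := rfl

lemma pv_min_fold {A : Type} (key : A -> Int) (l : List A) : ∀ a : A,
    l.foldl (pvMinStep key) (some a)
      = some ((PySem.List.min? l key).elim a (fun m => if key m < key a then m else a)) := by
  induction l with
  | nil => intro a; simp [pvMin_eq]
  | cons x t ih =>
    intro a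
    rw [List.foldl_cons,
        show pvMinStep key (some a) x = some (if key x < key a then x else a) from by
          by_cases h : key x < key a <;> simp [pvMinStep, h],
        ih,
        show PySem.List.min? (x :: t) key = t.foldl (pvMinStep key) (some x) from rfl,
        ih x]
    cases h : PySem.List.min? t key
    all_goals simp only [Option.elim, Option.some.injEq]
    all_goals split_ifs <;> first | rfl | omega

lemma pv_set01 (r : List Int) (a b : Int) (h : r.length = 2) :
    PySem.List.pySetD (PySem.List.pySetD r 0 a) 1 b = [a, b] := by
  match r, h with
  | [x, y], _ => rfl

lemma pv_rowchar {A : Type} (key : A -> Int) (out : A -> Int × Int) :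
    ∀ (P : List A) (r : List Int) (b : Int), r.length = 2 →
      P.foldl (fun s p => if key p < s.2 then
          (PySem.List.pySetD (PySem.List.pySetD s.1 0 (out p).1) 1 (out p).2, key p) else s) (r, b)
        = (PySem.List.min? P key).elim (r, b)
            (fun m => if key m < b then ([(out m).1, (out m).2], key m) else (r, b)) := by
  intro P
  induction P with
  | nil => intro r b _; simp [pvMin_eq]
  | cons p t ih =>
    intro r b hr
    rw [List.foldl_cons]
    rw [show PySem.List.min? (p :: t) key = t.foldl (pvMinStep key) (some p) from rfl, pv_min_fold]
    by_cases hp : key p < b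
    · simp only [if_pos hp, pv_set01 r _ _ hr]
      rw [ih [(out p).1, (out p).2] (key p) rfl]
      cases h : PySem.List.min? t key <;>
        simp only [Option.elim] <;> split_ifs <;> first | rfl | omega
    · simp only [if_neg hp]
      rw [ih r b hr]
      cases h : PySem.List.min? t key <;>
        simp only [Option.elim] <;> split_ifs <;> first | rfl | omega

lemma pv_get_set (t : List (List Int)) (i : Int) (v d : List Int)
    (h0 : 0 ≤ i) (h1 : i < (t.length : Int)) :
    PySem.List.pyGetD (PySem.List.pySetD t i v) i d = v := by
  rw [PySem.List.pySetD_of_nonneg _ _ h0,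
      PySem.List.pyGetD_eq_getElem (t.set i.toNat v) d h0 (by simp only [List.length_set]; omega)]
  rw [List.getElem_set, if_pos rfl]

lemma pv_set_set (t : List (List Int)) (i : Int) (v w : List Int) (h0 : 0 ≤ i) :
    PySem.List.pySetD (PySem.List.pySetD t i v) i w = PySem.List.pySetD t i w := by
  rw [PySem.List.pySetD_of_nonneg _ _ h0, PySem.List.pySetD_of_nonneg _ _ h0,
      PySem.List.pySetD_of_nonneg _ _ h0, List.set_set]

lemma pv_set_get (t : List (List Int)) (i : Int) (d : List Int)
    (h0 : 0 ≤ i) (h1 : i < (t.length : Int)) :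
    PySem.List.pySetD t i (PySem.List.pyGetD t i d) = t := by
  rw [PySem.List.pyGetD_eq_getElem t d h0 (by omega),
      PySem.List.pySetD_of_nonneg _ _ h0]
  exact List.set_getElem_self (by omega)

lemma pv_get_set_ne (t : List (List Int)) (i j : Int) (v d : List Int)
    (h0 : 0 ≤ i) (hj0 : 0 ≤ j) (hj1 : j < (t.length : Int)) (hne : j ≠ i) :
    PySem.List.pyGetD (PySem.List.pySetD t i v) j d = PySem.List.pyGetD t j d := by
  rw [PySem.List.pySetD_of_nonneg _ _ h0,
      PySem.List.pyGetD_eq_getElem (t.set i.toNat v) d hj0 (by simp only [List.length_set]; omega),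
      PySem.List.pyGetD_eq_getElem t d hj0 (by omega)]
  rw [List.getElem_set, if_neg (by omega)]

lemma pv_tablesplit {A : Type} (key : A -> Int) (out : A -> Int × Int) (i : Int) :
    ∀ (P : List A) (t : List (List Int)) (b : Int), 0 ≤ i → i < (t.length : Int) →
      P.foldl (fun s p => if key p < s.2 then
          (PySem.List.pySetD s.1 i
            (PySem.List.pySetD (PySem.List.pySetD (PySem.List.pyGetD s.1 i []) 0 (out p).1) 1 (out p).2),
           key p) else s) (t, b)
        = (PySem.List.pySetD t i
            (P.foldl (fun s p => if key p < s.2 then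
                (PySem.List.pySetD (PySem.List.pySetD s.1 0 (out p).1) 1 (out p).2, key p) else s)
              (PySem.List.pyGetD t i [], b)).1,
           (P.foldl (fun s p => if key p < s.2 then
                (PySem.List.pySetD (PySem.List.pySetD s.1 0 (out p).1) 1 (out p).2, key p) else s)
              (PySem.List.pyGetD t i [], b)).2) := by
  intro P
  induction P with
  | nil =>
    intro t b h0 h1
    simp [pv_set_get t i [] h0 h1]
  | cons p t' ih =>
    intro t b h0 h1
    rw [List.foldl_cons, List.foldl_cons]
    by_cases hp : key p < b
    · simp only [if_pos hp]
      rw [ih _ _ h0 (by rw [PySem.List.length_pySetD]; exact h1)]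
      rw [pv_get_set t i _ [] h0 h1, pv_set_set t i _ _ h0]
    · simp only [if_neg hp]
      exact ih t b h0 h1

lemma pv_outer (g : List (List Int) -> Int -> List (List Int)) (f : Int -> List Int)
    (hg : ∀ t i, 0 ≤ i → i < 256 → t.length = 256 → PySem.List.pyGetD t i [] = [0, 0] →
      g t i = PySem.List.pySetD t i (f i)) :
    ∀ (n : Nat) (a : Int) (t : List (List Int)), a = 256 - (n : Int) → 0 ≤ a → t.length = 256 →
      (∀ j : Int, a ≤ j → j < 256 → PySem.List.pyGetD t j [] = [0, 0]) →
      (PySem.List.pyRange a 256 1).foldl g t = t.take a.toNat ++ (PySem.List.pyRange a 256 1).map f := by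
  intro n
  induction n with
  | zero =>
    intro a t ha h0 hlen _
    have ha' : a = 256 := by omega
    subst ha'
    rw [PySem.List.pyRange_one_eq_nil (le_refl _)]
    simp only [List.foldl_nil, List.map_nil, List.append_nil]
    exact (List.take_of_length_le (by omega)).symm
  | succ m ih =>
    intro a t ha h0 hlen hinv
    have halt : a < 256 := by omega
    rw [PySem.List.pyRange_one_cons halt, List.foldl_cons, List.map_cons]
    rw [hg t a h0 halt hlen (hinv a (le_refl _) halt)]
    rw [ih (a + 1) _ (by omega) (by omega) (by rw [PySem.List.length_pySetD]; exact hlen)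
        (fun j hj1 hj2 => by
          rw [pv_get_set_ne t a j _ [] h0 (by omega) (by omega) (by omega)]
          exact hinv j (by omega) hj2)]
    have hkey : (PySem.List.pySetD t a (f a)).take (a + 1).toNat = t.take a.toNat ++ [f a] := by
      rw [PySem.List.pySetD_of_nonneg _ _ h0]
      have hk : a.toNat < t.length := by omega
      have h1 : (a + 1).toNat = a.toNat + 1 := by omega
      rw [h1, List.set_eq_take_append_cons_drop, if_pos hk,
          List.take_append, List.take_take]
      have h2 : min (a.toNat + 1) a.toNat = a.toNat := by omega
      have h3 : a.toNat + 1 - (t.take a.toNat).length = 1 := by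
        simp only [List.length_take]; omega
      rw [h2, h3]
      rfl
    rw [hkey, List.append_assoc]
    rfl

lemma pv_row_proj (P : List (Int × Int × Int)) (i : Int) :
    ((PySem.List.min? P (fun p => |p.1 - i|)).elim (([0, 0] : List Int), (256 : Int))
        (fun m => if |m.1 - i| < 256 then ([m.2.1, m.2.2], |m.1 - i|) else ([0, 0], 256))).1
      = pvRowF P i := by
  unfold pvRowF
  cases h : PySem.List.min? P (fun p => |p.1 - i|) with
  | none => rfl
  | some m => simp only [Option.elim]; split_ifs <;> rfl

lemma pv_stepA_eq (expand : List Int) (t : List (List Int)) (i : Int)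
    (h0 : 0 ≤ i) (h256 : i < 256) (hlen : t.length = 256)
    (hrow : PySem.List.pyGetD t i [] = [0, 0]) :
    pvStepA expand t i = PySem.List.pySetD t i (pvRowF (pvPairsP expand) i) := by
  have h1 : pvStepA expand t i
      = ((pvPairsP expand).foldl (fun (s : List (List Int) × Int) p =>
          if |p.1 - i| < s.2 then
            (PySem.List.pySetD s.1 i
              (PySem.List.pySetD (PySem.List.pySetD (PySem.List.pyGetD s.1 i []) 0 p.2.1) 1 p.2.2),
             |p.1 - i|) else s) (t, 256)).1 := by
    unfold pvStepA pvPairsP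
    rw [List.foldl_flatMap]
    simp only [List.foldl_map]
  rw [h1,
      pv_tablesplit (fun p => |p.1 - i|) (fun p => (p.2.1, p.2.2)) i (pvPairsP expand) t 256 h0
        (by omega),
      hrow,
      pv_rowchar (fun p => |p.1 - i|) (fun p => (p.2.1, p.2.2)) (pvPairsP expand) [0, 0] 256 rfl]
  rw [pv_row_proj]

lemma pv_A_eq (expand : List Int) :
    PrepareOptTable expand = (PySem.List.pyRange 0 256 1).map (pvRowF (pvPairsP expand)) := by
  have hlen0 : pvT0.length = 256 := by
    unfold pvT0
    rw [List.length_map, PySem.List.length_pyRange_one]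
    decide
  have hinv0 : ∀ j : Int, 0 ≤ j → j < 256 → PySem.List.pyGetD pvT0 j [] = [0, 0] := by
    intro j hj1 hj2
    unfold pvT0
    rw [PySem.List.pyGetD_map_pyRange_of_nonneg _ _ _ _ hj1 hj2]
    rfl
  have key := pv_outer (pvStepA expand) (pvRowF (pvPairsP expand))
    (fun t i h1 h2 h3 h4 => pv_stepA_eq expand t i h1 h2 h3 h4)
    256 0 pvT0 (by norm_num) (by norm_num) hlen0 (fun j hj1 hj2 => hinv0 j hj1 hj2)
  calc PrepareOptTable expand = (PySem.List.pyRange 0 256 1).foldl (pvStepA expand) pvT0 := rfl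
    _ = pvT0.take (0 : Int).toNat ++ (PySem.List.pyRange 0 256 1).map (pvRowF (pvPairsP expand)) := key
    _ = (PySem.List.pyRange 0 256 1).map (pvRowF (pvPairsP expand)) := by simp

-- ===== B-side proof machinery =====

-- first pair (in scan order, counting from k) whose blended value is v
def pvFirstAt : List (Int × Int × Int) → Int → Int → Option (Int × Int × Int)
  | [], _, _ => none
  | p :: t, v, k => if p.1 = v then some (k, p.2.1, p.2.2) else pvFirstAt t v (k + 1)

def pvDictStep (fk : PySem.Dict Int (Int × Int × Int) × Int) (p : Int × Int × Int) :
    PySem.Dict Int (Int × Int × Int) × Int :=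
  ((if fk.1.contains p.1 then fk.1 else fk.1.insert p.1 (fk.2, p.2.1, p.2.2)), fk.2 + 1)

def pvRingStep (F : Int → Option (Int × Int × Int)) (i : Int)
    (st : List Int × Bool) (d : Int) : List Int × Bool :=
  if st.2 then st
  else
    let lo := F (i - d)
    let hi := F (i + d)
    let c : Option (Int × Int × Int) :=
      match lo, hi with
      | some l, some h => some (if l.1 < h.1 then l else h)
      | some l, none => some l
      | none, some h => some h
      | none, none => none
    match c with
    | some c => ([c.2.1, c.2.2], true)
    | none => st

lemma pv_dict_get (v : Int) : ∀ (l : List (Int × Int × Int)) (d : PySem.Dict Int (Int × Int × Int)) (k : Int),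
    (l.foldl pvDictStep (d, k)).1.get? v = ((d.get? v).or (pvFirstAt l v k)) := by
  intro l
  induction l with
  | nil => intro d k; simp [pvFirstAt]
  | cons p t ih =>
    intro d k
    rw [List.foldl_cons]
    by_cases hc : d.contains p.1
    · rw [show pvDictStep (d, k) p = (d, k + 1) from by simp [pvDictStep, hc], ih]
      by_cases hv : p.1 = v
      · subst hv
        have : (d.get? p.1).isSome := by rw [← PySem.Dict.contains_eq_isSome_get?, hc]
        cases hg : d.get? p.1 with
        | none => rw [hg] at this; simp at this
        | some x => simp [pvFirstAt]
      · simp [pvFirstAt, hv]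
    · rw [show pvDictStep (d, k) p = (d.insert p.1 (k, p.2.1, p.2.2), k + 1) from by
          simp [pvDictStep, hc], ih]
      have hdn : d.get? p.1 = none := (PySem.Dict.get?_eq_none_iff_contains d p.1).mpr (by simpa using hc)
      by_cases hv : p.1 = v
      · subst hv
        rw [hdn, PySem.Dict.get?_insert]
        simp [pvFirstAt]
      · rw [PySem.Dict.get?_insert, if_neg (fun h => hv h.symm)]
        simp [pvFirstAt, hv]

lemma pv_firstAt_none (v : Int) : ∀ (l : List (Int × Int × Int)) (k : Int),
    pvFirstAt l v k = none → ∀ p ∈ l, p.1 ≠ v := by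
  intro l
  induction l with
  | nil => intro k _ p hp; cases hp
  | cons q t ih =>
    intro k h p hp
    unfold pvFirstAt at h
    by_cases hq : q.1 = v
    · rw [if_pos hq] at h; cases h
    · rw [if_neg hq] at h
      rcases List.mem_cons.mp hp with hp | hp
      · subst hp; exact hq
      · exact ih (k + 1) h p hp

lemma pv_firstAt_some (v : Int) : ∀ (l : List (Int × Int × Int)) (k : Int) (r : Int × Int × Int),
    pvFirstAt l v k = some r →
    ∃ l₁ l₂, l = l₁ ++ (v, r.2.1, r.2.2) :: l₂ ∧ r.1 = k + l₁.length ∧ ∀ p ∈ l₁, p.1 ≠ v := by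
  intro l
  induction l with
  | nil => intro k r h; cases h
  | cons q t ih =>
    intro k r h
    obtain ⟨q1, q2, q3⟩ := q
    unfold pvFirstAt at h
    by_cases hq : q1 = v
    · rw [if_pos hq] at h
      injection h with h
      subst hq
      refine ⟨[], t, ?_, ?_, by intro p hp; cases hp⟩
      · simp [← h]
      · simp [← h]
    · rw [if_neg hq] at h
      obtain ⟨l₁, l₂, he, hk, hne⟩ := ih (k + 1) r h
      refine ⟨(q1, q2, q3) :: l₁, l₂, by simp [he], ?_, ?_⟩
      · rw [hk]; simp; omega
      · intro p hp
        rcases List.mem_cons.mp hp with hp | hp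
        · subst hp; exact hq
        · exact hne p hp

lemma pv_min_stay {A : Type} (key : A → Int) : ∀ (l : List A) (m : A),
    (∀ x ∈ l, ¬ key x < key m) → l.foldl (pvMinStep key) (some m) = some m := by
  intro l
  induction l with
  | nil => intro m _; rfl
  | cons x t ih =>
    intro m h
    rw [List.foldl_cons,
        show pvMinStep key (some m) x = some m from by
          simp [pvMinStep, h x (List.mem_cons_self)]]
    exact ih m (fun y hy => h y (List.mem_cons_of_mem _ hy))

lemma pv_min_mem {A : Type} (key : A → Int) : ∀ (l : List A) (acc : Option A) (m : A),
    l.foldl (pvMinStep key) acc = some m → m ∈ l ∨ acc = some m := by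
  intro l
  induction l with
  | nil => intro acc m h; exact Or.inr h
  | cons x t ih =>
    intro acc m h
    rw [List.foldl_cons] at h
    rcases ih (pvMinStep key acc x) m h with hm | hm
    · exact Or.inl (List.mem_cons_of_mem _ hm)
    · cases acc with
      | none =>
        simp only [pvMinStep] at hm
        injection hm with hm
        exact Or.inl (hm ▸ List.mem_cons_self)
      | some a =>
        simp only [pvMinStep] at hm
        split_ifs at hm with hlt
        · injection hm with hm; exact Or.inl (hm ▸ List.mem_cons_self)
        · exact Or.inr hm

lemma pv_firstmin (i v mx mn : Int) (l₁ l₂ : List (Int × Int × Int))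
    (h1 : ∀ p ∈ l₁, |p.1 - i| ≠ |v - i|)
    (h2 : ∀ p ∈ l₁ ++ (v, mx, mn) :: l₂, |v - i| ≤ |p.1 - i|) :
    PySem.List.min? (l₁ ++ (v, mx, mn) :: l₂) (fun p => |p.1 - i|) = some (v, mx, mn) := by
  rw [pvMin_eq, List.foldl_append, List.foldl_cons]
  have h2' : ∀ p ∈ l₂, ¬ |p.1 - i| < |v - i| := fun p hp =>
    not_lt.mpr (h2 p (List.mem_append_right _ (List.mem_cons_of_mem _ hp)))
  cases hs : l₁.foldl (pvMinStep (fun p => |p.1 - i|)) none with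
  | none =>
    rw [show pvMinStep (fun p : Int × Int × Int => |p.1 - i|) none (v, mx, mn)
          = some (v, mx, mn) from rfl]
    exact pv_min_stay _ l₂ (v, mx, mn) h2'
  | some x =>
    have hx : x ∈ l₁ := by
      rcases pv_min_mem _ l₁ none x hs with h | h
      · exact h
      · cases h
    have hlt : |v - i| < |x.1 - i| := by
      have := h2 x (List.mem_append_left _ hx)
      have := h1 x hx
      omega
    rw [show pvMinStep (fun p : Int × Int × Int => |p.1 - i|) (some x) (v, mx, mn)
          = some (v, mx, mn) from by simp [pvMinStep, hlt]]
    exact pv_min_stay _ l₂ (v, mx, mn) h2'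

lemma pv_ring_flag (F : Int → Option (Int × Int × Int)) (i : Int) :
    ∀ (l : List Int) (st : List Int × Bool), st.2 = true →
      l.foldl (pvRingStep F i) st = st := by
  intro l
  induction l with
  | nil => intro st _; rfl
  | cons d t ih =>
    intro st h
    rw [List.foldl_cons, show pvRingStep F i st d = st from by unfold pvRingStep; rw [if_pos h]]
    exact ih st h

lemma pv_abs_eq (x y d : Int) (hd : 0 ≤ d) : |x - y| = d ↔ x = y + d ∨ x = y - d := by
  constructor <;> (intro h; rcases abs_cases (x - y) with ⟨h1, h2⟩ | ⟨h1, h2⟩ <;> omega)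

-- the chosen pair is the overall first pair attaining distance a
lemma pv_hit (E : List (Int × Int × Int)) (i a : Int) (ha : 0 ≤ a) (ha2 : a < 256)
    (hmin : ∀ p ∈ E, a ≤ |p.1 - i|)
    (c : Int × Int × Int)
    (hc : (match pvFirstAt E (i - a) 0, pvFirstAt E (i + a) 0 with
      | some l, some h => some (if l.1 < h.1 then l else h)
      | some l, none => some l
      | none, some h => some h
      | none, none => none) = some c) :
    pvRowF E i = [c.2.1, c.2.2] := by
  have main : ∃ l₁ l₂ v, E = l₁ ++ (v, c.2.1, c.2.2) :: l₂ ∧ |v - i| = a ∧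
      (∀ p ∈ l₁, |p.1 - i| ≠ a) := by
    cases hlo : pvFirstAt E (i - a) 0 with
    | none =>
      cases hhi : pvFirstAt E (i + a) 0 with
      | none => rw [hlo, hhi] at hc; cases hc
      | some h =>
        rw [hlo, hhi] at hc
        injection hc with hc; subst hc
        obtain ⟨l₁, l₂, he, _, hne⟩ := pv_firstAt_some (i + a) E 0 h hhi
        have hnlo := pv_firstAt_none (i - a) E 0 hlo
        refine ⟨l₁, l₂, i + a, he, (pv_abs_eq _ _ _ ha).mpr (Or.inl (by ring)), fun p hp => ?_⟩
        have h1 := hne p hp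
        have h2 := hnlo p (he ▸ List.mem_append_left _ hp)
        intro hceq
        rcases (pv_abs_eq p.1 i a ha).mp hceq with hh | hh <;> omega
    | some l =>
      cases hhi : pvFirstAt E (i + a) 0 with
      | none =>
        rw [hlo, hhi] at hc
        injection hc with hc; subst hc
        obtain ⟨l₁, l₂, he, _, hne⟩ := pv_firstAt_some (i - a) E 0 l hlo
        have hnhi := pv_firstAt_none (i + a) E 0 hhi
        refine ⟨l₁, l₂, i - a, he, (pv_abs_eq _ _ _ ha).mpr (Or.inr (by ring)), fun p hp => ?_⟩
        have h1 := hne p hp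
        have h2 := hnhi p (he ▸ List.mem_append_left _ hp)
        intro hceq
        rcases (pv_abs_eq p.1 i a ha).mp hceq with hh | hh <;> omega
      | some h =>
        rw [hlo, hhi] at hc
        injection hc with hc
        obtain ⟨l₁, l₂, he1, hk1, hne1⟩ := pv_firstAt_some (i - a) E 0 l hlo
        obtain ⟨h₁, h₂, he2, hk2, hne2⟩ := pv_firstAt_some (i + a) E 0 h hhi
        have hpre1 : l₁ <+: E := ⟨_, he1.symm⟩
        have hpre2 : h₁ <+: E := ⟨_, he2.symm⟩
        by_cases hlt : l.1 < h.1
        · rw [if_pos hlt] at hc; subst hc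
          have hsub : l₁ <+: h₁ :=
            List.prefix_of_prefix_length_le hpre1 hpre2 (by omega)
          refine ⟨l₁, l₂, i - a, he1, (pv_abs_eq _ _ _ ha).mpr (Or.inr (by ring)), fun p hp => ?_⟩
          have ha1 := hne1 p hp
          have ha2 := hne2 p (hsub.subset hp)
          intro hceq
          rcases (pv_abs_eq p.1 i a ha).mp hceq with hh | hh <;> omega
        · rw [if_neg hlt] at hc; subst hc
          have hsub : h₁ <+: l₁ :=
            List.prefix_of_prefix_length_le hpre2 hpre1 (by omega)
          refine ⟨h₁, h₂, i + a, he2, (pv_abs_eq _ _ _ ha).mpr (Or.inl (by ring)), fun p hp => ?_⟩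
          have ha1 := hne2 p hp
          have ha2 := hne1 p (hsub.subset hp)
          intro hceq
          rcases (pv_abs_eq p.1 i a ha).mp hceq with hh | hh <;> omega
  obtain ⟨l₁, l₂, v, he, hv, hne⟩ := main
  have hmin' : PySem.List.min? E (fun p => |p.1 - i|) = some (v, c.2.1, c.2.2) := by
    rw [he]
    exact pv_firstmin i v c.2.1 c.2.2 l₁ l₂ (fun p hp => by rw [hv]; exact hne p hp)
      (fun p hp => by rw [hv]; exact hmin p (he ▸ hp))
  unfold pvRowF
  rw [hmin']
  simp only [Option.elim]
  rw [if_pos (by simpa [hv] using ha2)]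

lemma pv_ring_main (E : List (Int × Int × Int)) (i : Int) :
    ∀ (n : Nat) (a : Int), a = 256 - (n : Int) → 0 ≤ a →
      (∀ p ∈ E, a ≤ |p.1 - i|) →
      ((PySem.List.pyRange a 256 1).foldl (pvRingStep (fun v => pvFirstAt E v 0) i)
        ([0, 0], false)).1 = pvRowF E i := by
  intro n
  induction n with
  | zero =>
    intro a ha _ hmin
    have ha' : a = 256 := by omega
    subst ha'
    rw [PySem.List.pyRange_one_eq_nil (le_refl _)]
    simp only [List.foldl_nil]
    unfold pvRowF
    cases hm : PySem.List.min? E (fun p => |p.1 - i|) with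
    | none => rfl
    | some m =>
      simp only [Option.elim]
      rw [if_neg (by have := hmin m (PySem.List.min?_mem hm); omega)]
  | succ k ih =>
    intro a ha h0 hmin
    have halt : a < 256 := by omega
    rw [PySem.List.pyRange_one_cons halt, List.foldl_cons]
    have hstep : pvRingStep (fun v => pvFirstAt E v 0) i ([0, 0], false) a
        = (match pvFirstAt E (i - a) 0, pvFirstAt E (i + a) 0 with
          | some l, some h => some (if l.1 < h.1 then l else h)
          | some l, none => some l
          | none, some h => some h
          | none, none => none).elim (([0, 0] : List Int), false) (fun c => ([c.2.1, c.2.2], true)) := by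
      cases hlo : pvFirstAt E (i - a) 0 <;> cases hhi : pvFirstAt E (i + a) 0 <;>
        simp [pvRingStep, hlo, hhi]
    cases hc : (match pvFirstAt E (i - a) 0, pvFirstAt E (i + a) 0 with
        | some l, some h => some (if l.1 < h.1 then l else h)
        | some l, none => some l
        | none, some h => some h
        | none, none => none) with
    | none =>
      rw [hstep, hc]
      simp only [Option.elim]
      apply ih (a + 1) (by omega) (by omega)
      intro p hp
      have h1 := hmin p hp
      have h2 : p.1 ≠ i - a := by
        cases hlo : pvFirstAt E (i - a) 0 with
        | none => exact pv_firstAt_none (i - a) E 0 hlo p hp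
        | some l => rw [hlo] at hc; cases hhi : pvFirstAt E (i + a) 0 <;> rw [hhi] at hc <;> cases hc
      have h3 : p.1 ≠ i + a := by
        cases hhi : pvFirstAt E (i + a) 0 with
        | none => exact pv_firstAt_none (i + a) E 0 hhi p hp
        | some h => rw [hhi] at hc; cases hlo : pvFirstAt E (i - a) 0 <;> rw [hlo] at hc <;> cases hc
      have h4 : |p.1 - i| ≠ a := fun hceq => by
        rcases (pv_abs_eq p.1 i a h0).mp hceq with hh | hh <;> omega
      omega
    | some c =>
      rw [hstep, hc]
      simp only [Option.elim]
      rw [pv_ring_flag _ _ _ _ rfl]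
      exact (pv_hit E i a h0 halt hmin c hc).symm

lemma pv_B_eq (expand : List Int) :
    PrepareOptTable_alt expand = (PySem.List.pyRange 0 256 1).map (pvRowF (pvPairsP expand)) := by
  unfold PrepareOptTable_alt
  simp only []
  rw [PySem.List.foldl_append_singleton_eq_map, List.nil_append]
  have hdict : ((PySem.List.pyRange 0 (expand.length : Int) 1).foldl (fun fk mn =>
      (PySem.List.pyRange 0 (expand.length : Int) 1).foldl
        (fun (fk : PySem.Dict Int (Int × Int × Int) × Int) mx =>
          ((if fk.1.contains (PySem.List.pyGetD expand mx 0 +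
              Mul8Bit (PySem.List.pyGetD expand mn 0 - PySem.List.pyGetD expand mx 0) 0x55)
            then fk.1
            else fk.1.insert (PySem.List.pyGetD expand mx 0 +
              Mul8Bit (PySem.List.pyGetD expand mn 0 - PySem.List.pyGetD expand mx 0) 0x55)
              (fk.2, mx, mn)), fk.2 + 1)) fk) (PySem.Dict.empty, 0))
      = (pvPairsP expand).foldl pvDictStep (PySem.Dict.empty, 0) := by
    unfold pvPairsP
    rw [List.foldl_flatMap]
    simp only [List.foldl_map]
    rfl
  have hget : ∀ v, ((pvPairsP expand).foldl pvDictStep (PySem.Dict.empty, 0)).1.get? v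
      = pvFirstAt (pvPairsP expand) v 0 := by
    intro v
    rw [pv_dict_get v (pvPairsP expand) PySem.Dict.empty 0, PySem.Dict.get?_empty]
    rfl
  apply List.map_congr_left
  intro i _
  have hfun : (fun (st : List Int × Bool) d =>
      if st.2 then st
      else
        let lo := ((pvPairsP expand).foldl pvDictStep (PySem.Dict.empty, 0)).1.get? (i - d)
        let hi := ((pvPairsP expand).foldl pvDictStep (PySem.Dict.empty, 0)).1.get? (i + d)
        let c : Option (Int × Int × Int) :=
          match lo, hi with
          | some l, some h => some (if l.1 < h.1 then l else h)
          | some l, none => some l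
          | none, some h => some h
          | none, none => none
        match c with
        | some c => ([c.2.1, c.2.2], true)
        | none => st)
      = pvRingStep (fun v => pvFirstAt (pvPairsP expand) v 0) i := by
    funext st d
    unfold pvRingStep
    rw [hget, hget]
  rw [hdict, hfun]
  exact pv_ring_main (pvPairsP expand) i 256 0 (by norm_num) (by norm_num)
    (fun p _ => abs_nonneg _)

-- ===== VERDICT (by name: the statement is the Claim_ definition above) =====
theorem PrepareOptTable_spec : Claim_equal_PrepareOptTable := by
  unfold Claim_equal_PrepareOptTable
  intro expand _
  unfold Spec_PrepareOptTable
  rw [pv_A_eq, pv_B_eq]
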